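-- pv_equiv track=rewrite | github.com/Billybar/py-exam | 24b_d-26-8/q3.py | min_str
-- ===== SOURCE A (Python) =====
-- def min_str(lst: list[str]) -> str:
--     # Base case: If the list contains only one string, that string is the minimum.
--     if len(lst) == 1:
--         return lst[0]
--     else:
--         # Recursive step:
--         # Get the first string in the current sublist.
--         first_str = lst[0]
--         # Recursively find the minimum string in the rest of the list.
--         min_in_rest = min_str(lst[1:])
--
--         # Compare the length of the first string with the minimum found in the rest.
--         if len(first_str) <= len(min_in_rest):
--             return first_str
--         else:
--             return min_in_rest
-- ===== SOURCE B (Python) =====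
-- def min_str(lst: list[str]) -> str:
--     best = lst[0]
--     for s in lst[1:]:
--         if len(s) < len(best):
--             best = s
--     return best
-- ===== Notes on version B (the rewrite author's own statement) =====
-- stated objective: faster
-- what changed: Replaces A's recursion on the list tail (slicing a new list each call, deep call stack) with a single iterative forward scan keeping the current earliest shortest string (strict < preserves A's tie-breaking).
import Mathlib
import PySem

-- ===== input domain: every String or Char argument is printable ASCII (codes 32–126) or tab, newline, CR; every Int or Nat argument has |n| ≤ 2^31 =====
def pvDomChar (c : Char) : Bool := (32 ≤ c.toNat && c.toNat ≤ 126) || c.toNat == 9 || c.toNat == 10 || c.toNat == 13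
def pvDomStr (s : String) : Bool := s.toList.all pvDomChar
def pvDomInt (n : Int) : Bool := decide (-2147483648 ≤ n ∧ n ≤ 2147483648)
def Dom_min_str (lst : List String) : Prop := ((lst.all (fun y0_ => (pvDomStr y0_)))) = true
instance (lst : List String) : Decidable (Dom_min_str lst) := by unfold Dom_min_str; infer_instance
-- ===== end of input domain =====

-- B replaces A's recursion over the list tail by one iterative forward scan keeping the
-- current earliest shortest string: O(n) vs A's O(n^2) slicing (objective: faster, measured). Both raise IndexError on [],
-- excluded by Pre_.


-- ===== PORT A =====
-- A: recursion; on [] Python raises IndexError (excluded by Pre_), "" is a placeholder.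
def min_str (lst : List String) : String :=
  match lst with
  | [] => ""
  | [x] => x
  | x :: y :: t =>
    let first_str := x
    let min_in_rest := min_str (y :: t)
    if first_str.length ≤ min_in_rest.length then first_str else min_in_rest

-- ===== PORT B =====
-- B: iterative scan; best := lst[0] (IndexError on [], excluded by Pre_), then for each
-- later s, best := s when len(s) < len(best).
def minStrStep (best s : String) : String :=
  if s.length < best.length then s else best

def min_str_alt (lst : List String) : String :=
  match lst with
  | [] => ""
  | x :: rest => rest.foldl minStrStep x

-- ===== PRECONDITION & SPEC =====
-- Pre_ excludes only the empty list, on which both A and B raise IndexError.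
def Pre_min_str (lst : List String) : Prop := lst ≠ []
instance (lst : List String) : Decidable (Pre_min_str lst) := by unfold Pre_min_str; infer_instance
def pvWitness_min_str : List String := ["ab", "c", "d"]

def Spec_min_str (lst : List String) (out : String) : Prop := out = min_str_alt lst
instance (lst : List String) (out : String) : Decidable (Spec_min_str lst out) := by unfold Spec_min_str; infer_instance

-- ===== CLAIM (what is proved, stated in full; the proofs are below) =====
def Claim_equal_min_str : Prop := ∀ (lst : List String), Dom_min_str lst → Pre_min_str lst → Spec_min_str lst (min_str lst)

-- ===== LEMMAS AND PROOFS =====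
theorem minStrStep_assoc (a b c : String) :
    minStrStep (minStrStep a b) c = minStrStep a (minStrStep b c) := by
  simp only [minStrStep]
  split_ifs <;> first | rfl | omega

theorem foldl_step (t : List String) (x y : String) :
    t.foldl minStrStep (minStrStep x y) =
      if x.length ≤ (t.foldl minStrStep y).length then x else t.foldl minStrStep y := by
  induction t generalizing x y with
  | nil =>
    simp only [List.foldl, minStrStep]
    split_ifs <;> first | rfl | omega
  | cons z s ih =>
    simp only [List.foldl]
    rw [minStrStep_assoc, ih]

theorem min_str_cons (t : List String) (x : String) :
    min_str (x :: t) = t.foldl minStrStep x := by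
  induction t generalizing x with
  | nil => rfl
  | cons y s ih =>
    show (if x.length ≤ (min_str (y :: s)).length then x else min_str (y :: s)) = _
    rw [ih y]
    simp only [List.foldl]
    rw [foldl_step]

-- ===== VERDICT (by name: the statement is the Claim_ definition above) =====
theorem min_str_spec : Claim_equal_min_str := by
  intro lst _ hpre
  unfold Spec_min_str
  cases lst with
  | nil => exact absurd rfl hpre
  | cons x t => simpa [min_str_alt] using min_str_cons t x
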